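-- pv_equiv track=rewrite | github.com/smutaogroup/tem1_acylation_pathfitting | 6.data.prepare/3.dataset.conclude/ds.prepare.py | correlate_distlist
-- ===== SOURCE A (Python) =====
-- def correlate_distlist(energy_list, structure_list):
--     '''sort the structure list such that the order is the same with energy list
--
--     data structure of energy_list:
--     [ ( state, pathid, [ r1(energy, progress)
--                          r2(energy, progress)
--                          r3(energy, progress)
--                          ... <= 50 tuples <= 50 replicas
--                        ],
--       ),
--       ( state, pathid, [ r1(energy, progress)
--                          r2(energy, progress)
--                          r3(energy, progress)
--                          ...  <= 50 tuples <= 50 replicas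
--                        ],
--       ),
--       ...
--     ]
--
--     data structure of structure_list:
--     [ (state, pathid, repid, distlist[]) ]
--
--     data structure of sorted_distlist:
--     [ (state, pathid, [ r1dist_[ ],
--                         r2dist_[ ],
--                         r3dist_[ ],
--                       ],
--       ),
--       (state, pathid, [ r1dist_[ ],
--                         r2dist_[ ],
--                         r3dist_[ ],
--                       ],
--       ),
--       (state, pathid, [ r1dist_[ ],
--                         r2dist_[ ],
--                         r3dist_[ ],
--                       ],
--       ),
--       ...
--     ]
--     '''
--
--     sorted_distlist = []
--
--     for energy in energy_list:
--         state = energy[0]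
--         pathid = energy[1]
--         temp_struc_list = []
--
--         for i in range(1,51):
--
--             for structure in structure_list:
--
--                 if structure[0] == state and structure[1] == pathid and structure[2] == str(i):
--                     temp_struc_list.append(structure[3])
--
--         sorted_distlist.append(
--             (
--                 state,
--                 pathid,
--                 temp_struc_list,
--             )
--         )
--
--     return sorted_distlist
-- ===== SOURCE B (Python) =====
-- def correlate_distlist(energy_list, structure_list):
--     '''Same result as A, but: index structure_list ONCE by (state, pathid, repid)
--     (buckets keep structure_list order), then per energy just concatenate the
--     buckets for repid "1".."50" — the 50 full rescans of structure_list per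
--     energy disappear.'''
--     valid_ids = [str(i) for i in range(1, 51)]
--     index = {}
--     for s in structure_list:
--         index.setdefault((s[0], s[1], s[2]), []).append(s[3])
--     result = []
--     for e in energy_list:
--         temp = []
--         for r in valid_ids:
--             temp.extend(index.get((e[0], e[1], r), []))
--         result.append((e[0], e[1], temp))
--     return result
-- ===== Notes on version B (the rewrite author's own statement) =====
-- stated objective: faster
-- what changed: Replaces A's 50 counter-driven rescans of structure_list per energy with a dict index built in one pass over structure_list, keyed by (state, pathid, repid); each energy then just concatenates 50 bucket lookups.
import Mathlib
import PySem

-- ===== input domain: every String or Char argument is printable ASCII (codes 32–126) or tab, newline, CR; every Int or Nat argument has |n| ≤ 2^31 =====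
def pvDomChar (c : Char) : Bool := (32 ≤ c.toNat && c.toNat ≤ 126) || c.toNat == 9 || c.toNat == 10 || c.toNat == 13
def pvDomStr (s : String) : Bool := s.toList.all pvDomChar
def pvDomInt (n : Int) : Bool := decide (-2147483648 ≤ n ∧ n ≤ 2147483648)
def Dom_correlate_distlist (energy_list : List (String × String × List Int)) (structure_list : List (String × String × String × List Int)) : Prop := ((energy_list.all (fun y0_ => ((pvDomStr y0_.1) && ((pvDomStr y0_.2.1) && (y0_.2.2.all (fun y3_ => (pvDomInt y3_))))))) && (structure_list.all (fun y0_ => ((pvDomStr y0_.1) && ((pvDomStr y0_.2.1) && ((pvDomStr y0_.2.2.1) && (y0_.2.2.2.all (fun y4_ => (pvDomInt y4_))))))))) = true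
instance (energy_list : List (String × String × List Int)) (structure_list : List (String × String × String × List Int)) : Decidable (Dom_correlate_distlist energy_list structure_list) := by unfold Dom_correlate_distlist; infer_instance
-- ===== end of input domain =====

-- B replaces A's 50 rescans of structure_list per energy with a dict index built once; measurably faster on large inputs.


-- ===== PORT A =====
def correlate_distlist (energy_list : List (String × String × List Int)) (structure_list : List (String × String × String × List Int)) : List (String × String × List (List Int)) :=
  energy_list.foldl (fun sorted_distlist energy =>
    let state := energy.1
    let pathid := energy.2.1
    let temp_struc_list := (PySem.List.pyRange 1 51 1).foldl (fun temp i =>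
      structure_list.foldl (fun temp struc =>
        if struc.1 == state && struc.2.1 == pathid && struc.2.2.1 == PySem.Int.toStr i
        then temp ++ [struc.2.2.2] else temp) temp) []
    sorted_distlist ++ [(state, pathid, temp_struc_list)]) []

-- ===== PORT B =====
-- index.setdefault(k, []).append(v) is modelled exactly by Dict.modify k [] (· ++ [v]).
def correlate_distlist_alt (energy_list : List (String × String × List Int)) (structure_list : List (String × String × String × List Int)) : List (String × String × List (List Int)) :=
  let valid_ids := (PySem.List.pyRange 1 51 1).map PySem.Int.toStr
  let index : PySem.Dict (String × String × String) (List (List Int)) :=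
    structure_list.foldl (fun d s => d.modify (s.1, s.2.1, s.2.2.1) [] (· ++ [s.2.2.2])) PySem.Dict.empty
  energy_list.foldl (fun result e =>
    let temp := valid_ids.foldl (fun temp r => temp ++ index.getD (e.1, e.2.1, r) []) []
    result ++ [(e.1, e.2.1, temp)]) []

-- ===== PRECONDITION & SPEC =====
def Spec_correlate_distlist (energy_list : List (String × String × List Int)) (structure_list : List (String × String × String × List Int)) (out : List (String × String × List (List Int))) : Prop := out = correlate_distlist_alt energy_list structure_list
instance (energy_list : List (String × String × List Int)) (structure_list : List (String × String × String × List Int)) (out : List (String × String × List (List Int))) : Decidable (Spec_correlate_distlist energy_list structure_list out) := by unfold Spec_correlate_distlist; infer_instance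

-- ===== CLAIM (what is proved, stated in full; the proofs are below) =====
def Claim_equal_correlate_distlist : Prop := ∀ (energy_list : List (String × String × List Int)) (structure_list : List (String × String × String × List Int)), Dom_correlate_distlist energy_list structure_list → Spec_correlate_distlist energy_list structure_list (correlate_distlist energy_list structure_list)

-- ===== LEMMAS AND PROOFS =====

-- B's dict bucket at key k is exactly the distlists of the structures whose (state, pathid, repid) is k, in structure_list order.
theorem pv_bucket (S : List (String × String × String × List Int)) (k : String × String × String) :
    ((S.foldl (fun d s => d.modify (s.1, s.2.1, s.2.2.1) [] (· ++ [s.2.2.2]))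
        (PySem.Dict.empty : PySem.Dict (String × String × String) (List (List Int)))).getD k [])
    = (S.filter (fun s => (s.1, s.2.1, s.2.2.1) == k)).map (fun s => s.2.2.2) := by
  have h := PySem.Dict.getD_foldl_modify_append
      (l := S.map (fun s => ((s.1, s.2.1, s.2.2.1), s.2.2.2)))
      (d := (PySem.Dict.empty : PySem.Dict (String × String × String) (List (List Int)))) (c := k)
  rw [List.foldl_map] at h
  simpa [List.filter_map, List.map_map, Function.comp] using h

-- A's temp list for (state, pathid) equals B's temp list for (state, pathid).
theorem pv_temp_eq (state pathid : String) (S : List (String × String × String × List Int)) :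
    (PySem.List.pyRange 1 51 1).foldl (fun temp i =>
      S.foldl (fun temp struc =>
        if struc.1 == state && struc.2.1 == pathid && struc.2.2.1 == PySem.Int.toStr i
        then temp ++ [struc.2.2.2] else temp) temp) []
    = ((PySem.List.pyRange 1 51 1).map PySem.Int.toStr).foldl (fun temp r =>
        temp ++ ((S.foldl (fun d s => d.modify (s.1, s.2.1, s.2.2.1) [] (· ++ [s.2.2.2]))
          (PySem.Dict.empty : PySem.Dict (String × String × String) (List (List Int)))).getD (state, pathid, r) [])) [] := by
  rw [List.foldl_map]
  apply PySem.List.foldl_congr_mem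
  intro acc i _
  rw [PySem.List.foldl_append_if, pv_bucket]
  congr 1
  congr 1
  apply List.filter_congr
  intro s _
  obtain ⟨a, b, c, d⟩ := s
  show (a == state && b == pathid && c == PySem.Int.toStr i) = ((a, b, c) == (state, pathid, PySem.Int.toStr i))
  rw [Bool.and_assoc]
  rfl

theorem correlate_distlist_eq (energy_list : List (String × String × List Int)) (structure_list : List (String × String × String × List Int)) :
    correlate_distlist energy_list structure_list = correlate_distlist_alt energy_list structure_list := by
  unfold correlate_distlist correlate_distlist_alt
  apply PySem.List.foldl_congr_mem
  intro acc e _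
  simp only [pv_temp_eq e.1 e.2.1 structure_list]

-- ===== VERDICT (by name: the statement is the Claim_ definition above) =====
theorem correlate_distlist_spec : Claim_equal_correlate_distlist := by
  intro E S _
  exact correlate_distlist_eq E S
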